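-- pv_equiv track=rewrite | github.com/MukeshKumarS/Numerology | main.py | buildPyramid
-- ===== SOURCE A (Python) =====
-- def totalValue(number):
-- 	tSum = []
-- 	rev = 0
-- 	while (number > 0):
-- 		reminder = number % 10
-- 		rev = rev * 10 + reminder
-- 		tSum.append(reminder)
-- 		number = number // 10
-- 	sValue = sum(tSum)
-- 	if sValue > 9:
-- 		fVal = sValue
-- 		return totalValue(fVal)
-- 	else:
-- 		return sValue
--
-- def buildPyramid(numArray, tArr):
-- 	rArray = []
-- 	for cVal, nVal in zip(numArray, numArray[1:]):
-- 		num = cVal + nVal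
-- 		tNum = totalValue(num)
-- 		rArray.append(tNum)
-- 	rLen = len(rArray)
-- 	if rLen >= 2:
-- 		tArr.append(rArray)
-- 		return buildPyramid(rArray, tArr)
-- 	else:
-- 		return tArr
-- ===== SOURCE B (Python) =====
-- def totalValue(number):
--     # digital root, closed form: 0 for non-positive input, else 1 + (n-1) % 9
--     return 0 if number <= 0 else 1 + (number - 1) % 9
--
-- def buildPyramid(numArray, tArr):
--     current = numArray
--     while True:
--         rArray = [totalValue(a + b) for a, b in zip(current, current[1:])]
--         if len(rArray) < 2:
--             return tArr
--         tArr.append(rArray)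
--         current = rArray
-- ===== Notes on version B (the rewrite author's own statement) =====
-- stated objective: faster
-- what changed: totalValue's digit-extraction loop plus recursion is replaced by the closed-form digital root 1+(n-1)%9 (0 for non-positive n), and buildPyramid's self-recursion becomes a while loop with a comprehension per level.
import Mathlib
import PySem

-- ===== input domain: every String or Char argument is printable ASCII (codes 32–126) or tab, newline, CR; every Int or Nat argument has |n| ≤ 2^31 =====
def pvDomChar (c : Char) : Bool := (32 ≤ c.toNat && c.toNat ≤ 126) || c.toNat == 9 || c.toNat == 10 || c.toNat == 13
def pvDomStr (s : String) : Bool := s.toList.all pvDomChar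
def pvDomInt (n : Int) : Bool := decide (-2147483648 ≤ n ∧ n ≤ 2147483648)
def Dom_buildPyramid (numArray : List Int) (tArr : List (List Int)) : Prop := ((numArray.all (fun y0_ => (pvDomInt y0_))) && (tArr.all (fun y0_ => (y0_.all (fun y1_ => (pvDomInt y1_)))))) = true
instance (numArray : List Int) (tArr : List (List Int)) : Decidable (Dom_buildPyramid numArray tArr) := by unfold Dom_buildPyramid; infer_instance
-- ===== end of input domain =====

-- B replaces A's digit-loop + recursion digital root by the closed form 1+(n-1)%9 and the
-- pyramid self-recursion by an iterative loop (same in-place append to tArr as A; return value proved equal).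


-- ===== PORT A =====
-- the 'while (number > 0)' loop of totalValue, state (tSum, rev); fuel ≥ number.toNat only guards
-- totality (each iteration strictly shrinks number.toNat, so the 0-fuel branch is never the result)
def tvLoop (fuel : Nat) (number : Int) (tSum : List Int) (rev : Int) : List Int × Int :=
  match fuel with
  | 0 => (tSum, rev)
  | f + 1 =>
    if number > 0 then
      tvLoop f (PySem.Int.floordiv number 10) (tSum ++ [PySem.Int.mod number 10])
        (rev * 10 + PySem.Int.mod number 10)
    else (tSum, rev)

-- the tail recursion 'return totalValue(fVal)'; the digit sum strictly shrinks, fuel only guards totality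
def tvGo (fuel : Nat) (number : Int) : Int :=
  match fuel with
  | 0 => 0
  | f + 1 =>
    if ((tvLoop number.toNat number [] 0).1).sum > 9 then
      tvGo f (((tvLoop number.toNat number [] 0).1).sum)
    else ((tvLoop number.toNat number [] 0).1).sum

def totalValue (number : Int) : Int := tvGo (number.toNat + 1) number

-- the self-recursion of A's buildPyramid; each call shortens numArray by one, fuel only guards totality
def bpGo (fuel : Nat) (numArray : List Int) (tArr : List (List Int)) : List (List Int) :=
  match fuel with
  | 0 => tArr
  | f + 1 =>
    let rArray := (numArray.zip (PySem.List.slice numArray (some 1) none)).foldl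
      (fun acc p => acc ++ [totalValue (p.1 + p.2)]) []
    if rArray.length ≥ 2 then bpGo f rArray (tArr ++ [rArray]) else tArr

def buildPyramid (numArray : List Int) (tArr : List (List Int)) : List (List Int) :=
  bpGo numArray.length numArray tArr

-- ===== PORT B =====
def totalValue_alt (number : Int) : Int :=
  if number ≤ 0 then 0 else 1 + PySem.Int.mod (number - 1) 9

-- the while-True loop of B's buildPyramid; each pass shortens current by one, fuel only guards totality
def pyrGo (fuel : Nat) (current : List Int) (tArr : List (List Int)) : List (List Int) :=
  match fuel with
  | 0 => tArr
  | f + 1 =>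
    let rArray := (current.zip (current.drop 1)).map (fun p => totalValue_alt (p.1 + p.2))
    if rArray.length < 2 then tArr else pyrGo f rArray (tArr ++ [rArray])

def buildPyramid_alt (numArray : List Int) (tArr : List (List Int)) : List (List Int) :=
  pyrGo numArray.length numArray tArr

-- ===== PRECONDITION & SPEC =====
def Spec_buildPyramid (numArray : List Int) (tArr : List (List Int)) (out : List (List Int)) : Prop := out = buildPyramid_alt numArray tArr
instance (numArray : List Int) (tArr : List (List Int)) (out : List (List Int)) : Decidable (Spec_buildPyramid numArray tArr out) := by unfold Spec_buildPyramid; infer_instance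

-- ===== CLAIM (what is proved, stated in full; the proofs are below) =====
def Claim_equal_buildPyramid : Prop := ∀ (numArray : List Int) (tArr : List (List Int)), Dom_buildPyramid numArray tArr → Spec_buildPyramid numArray tArr (buildPyramid numArray tArr)

-- ===== LEMMAS AND PROOFS =====

-- proof-side digit-sum function
def dsum (n : Int) : Int :=
  if h : 0 < n then PySem.Int.mod n 10 + dsum (PySem.Int.floordiv n 10) else 0
termination_by n.toNat
decreasing_by
  rw [PySem.Int.floordiv_eq_ediv_of_pos (by omega : (0:Int) < 10)]
  omega

theorem dsum_zero : dsum 0 = 0 := by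
  rw [dsum]; simp

theorem dsum_nonpos (n : Int) (h : n ≤ 0) : dsum n = 0 := by
  rw [dsum, dif_neg (by omega)]

theorem tvLoop_sum (f : Nat) : ∀ (n : Int) (acc : List Int) (rev : Int), n.toNat ≤ f →
    ((tvLoop f n acc rev).1).sum = acc.sum + dsum n := by
  induction f with
  | zero =>
    intro n acc rev hle
    rw [tvLoop, dsum_nonpos n (by omega)]
    simp
  | succ f ih =>
    intro n acc rev hle
    rw [tvLoop]
    by_cases hn : n > 0
    · rw [if_pos hn]
      have h10 : (0:Int) < 10 := by omega
      have hdec : (PySem.Int.floordiv n 10).toNat ≤ f := by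
        rw [PySem.Int.floordiv_eq_ediv_of_pos h10]; omega
      rw [ih _ _ _ hdec]
      conv_rhs => rw [dsum, dif_pos hn]
      simp [List.sum_append]
      ring
    · rw [if_neg hn, dsum_nonpos n (by omega)]
      simp

theorem dsum_props (n : Int) :
    0 ≤ dsum n ∧ (0 ≤ n → dsum n ≤ n) ∧ (10 ≤ n → dsum n < n) ∧
      (1 ≤ n → 1 ≤ dsum n) ∧ (0 ≤ n → dsum n % 9 = n % 9) := by
  fun_induction dsum n with
  | case1 n h ih =>
    rw [PySem.Int.floordiv_eq_ediv_of_pos (by omega : (0:Int) < 10)] at ih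
    rw [PySem.Int.mod_eq_emod_of_pos (by omega : (0:Int) < 10),
        PySem.Int.floordiv_eq_ediv_of_pos (by omega : (0:Int) < 10)]
    obtain ⟨h1, h2, h3, h4, h5⟩ := ih
    have hq : 0 ≤ n / 10 := by omega
    have hd : n % 10 + 10 * (n / 10) = n := by omega
    have h2' := h2 hq
    have h5' := h5 hq
    by_cases hq1 : 1 ≤ n / 10
    · have := h4 hq1
      refine ⟨by omega, by omega, by omega, by omega, by omega⟩
    · have hq0 : n / 10 = 0 := by omega
      rw [hq0, dsum_zero] at *
      refine ⟨by omega, by omega, by omega, by omega, by omega⟩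
  | case2 n h =>
    refine ⟨by omega, by omega, by omega, by omega, ?_⟩
    intro h0
    have : n = 0 := by omega
    simp [this]

theorem dsum_lt_self_of_gt9 (n : Int) (h : 9 < dsum n) : dsum n < n := by
  have hp := dsum_props n
  by_cases h10 : 10 ≤ n
  · exact hp.2.2.1 h10
  · by_cases h0 : 0 ≤ n
    · have := hp.2.1 h0; omega
    · rw [dsum_nonpos n (by omega)] at h; omega

theorem tvGo_step (f : Nat) (n : Int) :
    tvGo (f + 1) n = if dsum n > 9 then tvGo f (dsum n) else dsum n := by
  rw [tvGo, tvLoop_sum n.toNat n [] 0 le_rfl]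
  simp

-- tvGo computes the closed-form digital root once the fuel dominates the argument
theorem tvGo_closed (f : Nat) : ∀ k : Int, k.toNat < f →
    tvGo f k = if k ≤ 0 then 0 else 1 + (k - 1) % 9 := by
  induction f with
  | zero => intro k hk; omega
  | succ f ih =>
    intro k hk
    obtain ⟨h1, h2, h3, h4, h5⟩ := dsum_props k
    rw [tvGo_step]
    by_cases hk0 : k ≤ 0
    · rw [dsum_nonpos k hk0]
      simp [hk0]
    · have hkpos : 0 < k := by omega
      have hmod := h5 (by omega)
      by_cases hbig : dsum k > 9
      · rw [if_pos hbig]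
        have hlt : dsum k < k := dsum_lt_self_of_gt9 k hbig
        rw [ih (dsum k) (by omega)]
        rw [if_neg (by omega)]
        rw [if_neg (by omega)]
        omega
      · rw [if_neg hbig, if_neg (by omega)]
        have := h4 (by omega)
        omega

theorem totalValue_eq (n : Int) : totalValue n = totalValue_alt n := by
  rw [totalValue, totalValue_alt, tvGo_closed (n.toNat + 1) n (by omega)]
  by_cases hn : n ≤ 0
  · rw [if_pos hn, if_pos hn]
  · rw [if_neg hn, if_neg hn,
        PySem.Int.mod_eq_emod_of_pos (by omega : (0:Int) < 9)]

-- the two level-building passes produce the same row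
theorem row_eq (c : List Int) :
    (c.zip (PySem.List.slice c (some 1) none)).foldl
        (fun acc p => acc ++ [totalValue (p.1 + p.2)]) [] =
      (c.zip (c.drop 1)).map (fun p => totalValue_alt (p.1 + p.2)) := by
  simp only [PySem.List.foldl_append_singleton_eq_map, List.nil_append,
    PySem.List.slice_from_one, List.drop_one, totalValue_eq]

theorem bpGo_eq_pyrGo (f : Nat) : ∀ (c : List Int) (t : List (List Int)),
    bpGo f c t = pyrGo f c t := by
  induction f with
  | zero => intro c t; rw [bpGo, pyrGo]
  | succ f ih =>
    intro c t
    rw [bpGo, pyrGo]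
    simp only [row_eq]
    by_cases h : ((c.zip (c.drop 1)).map (fun p => totalValue_alt (p.1 + p.2))).length ≥ 2
    · rw [if_pos h, if_neg (by omega), ih]
    · rw [if_neg h, if_pos (by omega)]

-- ===== VERDICT (by name: the statement is the Claim_ definition above) =====
theorem buildPyramid_spec : Claim_equal_buildPyramid := by
  intro numArray tArr _
  unfold Spec_buildPyramid buildPyramid_alt buildPyramid
  exact bpGo_eq_pyrGo numArray.length numArray tArr
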